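-- pv_equiv track=rewrite | github.com/ya-bessmerti/task_solution | yandex_practicum/algoritms/sprint_11_1-3/sleight_hand.py | get_simulator_printings
-- ===== SOURCE A (Python) =====
-- from collections import Counter
-- from typing import List, Union
--
-- def get_simulator_printings(
--     number_keys: int,
--     field: List[Union[int, str]],
-- ) -> int:
--     result = 0
--     field_in_line = Counter([
--         item
--         for field_string in field
--         for item in field_string
--     ])
--     dict_field = dict(field_in_line)
--     dict_field.pop('.', None)
--     for item in dict_field.values():
--         if item <= 2*number_keys:
--             result +=1
--     return result
-- ===== SOURCE B (Python) =====
-- def get_simulator_printings(number_keys, field):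
--     def go(cs):
--         if not cs:
--             return 0
--         c = cs[0]
--         rest = [x for x in cs if x != c]
--         hit = 1 if c != '.' and len(cs) - len(rest) <= 2 * number_keys else 0
--         return hit + go(rest)
--     return go([item for field_string in field for item in field_string])
-- ===== Notes on version B (the rewrite author's own statement) =====
-- stated objective: alternative
-- what changed: Replaces A's Counter/dict-pop/value-loop pipeline with a recursive extract-and-remove algorithm: repeatedly take the first remaining character, delete all its occurrences, read its frequency off the length drop, and recurse on the shrunken list.
import Mathlib
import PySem

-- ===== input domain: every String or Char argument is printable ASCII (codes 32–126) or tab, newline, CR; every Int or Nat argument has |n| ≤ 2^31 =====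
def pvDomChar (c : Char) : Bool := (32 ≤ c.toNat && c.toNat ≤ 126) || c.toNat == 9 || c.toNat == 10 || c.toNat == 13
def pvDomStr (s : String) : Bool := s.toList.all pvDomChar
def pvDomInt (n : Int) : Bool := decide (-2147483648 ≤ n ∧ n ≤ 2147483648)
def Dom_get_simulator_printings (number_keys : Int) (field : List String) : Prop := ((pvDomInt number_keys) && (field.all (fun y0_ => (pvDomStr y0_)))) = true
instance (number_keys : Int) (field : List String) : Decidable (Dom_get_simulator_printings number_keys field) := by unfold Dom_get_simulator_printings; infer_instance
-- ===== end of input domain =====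

-- B replaces A's Counter/dict/value-loop with a recursive extract-and-remove algorithm:
-- take the first remaining character, delete all its occurrences, read its frequency off
-- the length drop, recurse on the remainder (objective: alternative; not faster).

-- ===== PORT A =====
def get_simulator_printings (number_keys : Int) (field : List String) : Int :=
  let field_in_line := PySem.Dict.counter (field.flatMap (fun field_string => field_string.toList))
  let dict_field := field_in_line.erase '.'
  dict_field.values.foldl (fun result item => if item ≤ 2 * number_keys then result + 1 else result) 0

-- ===== PORT B =====
-- go(cs): head char, remove all its occurrences, frequency = length difference, recurse.
def pvGoB (number_keys : Int) : List Char → Int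
  | [] => 0
  | c :: tl =>
    let rest := (c :: tl).filter (fun x => !(x == c))
    (if c ≠ '.' ∧ ((c :: tl).length : Int) - (rest.length : Int) ≤ 2 * number_keys then 1 else 0)
      + pvGoB number_keys rest
termination_by cs => cs.length
decreasing_by
  simp only [List.filter_cons, beq_self_eq_true, Bool.not_true, List.length_cons,
    if_false, Bool.false_eq_true]
  exact Nat.lt_succ_of_le (List.length_filter_le _ _)

def get_simulator_printings_alt (number_keys : Int) (field : List String) : Int :=
  pvGoB number_keys (field.flatMap (fun field_string => field_string.toList))

-- ===== PRECONDITION & SPEC =====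
def Spec_get_simulator_printings (number_keys : Int) (field : List String) (out : Int) : Prop := out = get_simulator_printings_alt number_keys field
instance (number_keys : Int) (field : List String) (out : Int) : Decidable (Spec_get_simulator_printings number_keys field out) := by unfold Spec_get_simulator_printings; infer_instance

-- ===== CLAIM (what is proved, stated in full; the proofs are below) =====
def Claim_equal_get_simulator_printings : Prop := ∀ (number_keys : Int) (field : List String), Dom_get_simulator_printings number_keys field → Spec_get_simulator_printings number_keys field (get_simulator_printings number_keys field)

-- ===== LEMMAS AND PROOFS =====

lemma pvCountP_not_add (p : Char → Bool) (l : List Char) :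
    l.countP (fun x => !p x) + l.countP p = l.length := by
  induction l with
  | nil => simp
  | cons a t ih =>
    by_cases h : p a = true <;> simp [h] <;> omega

-- The common value both ports compute: the number of distinct non-'.' characters of cs
-- whose multiplicity in cs is at most 2*k.
def pvSpecCount (k : Int) (cs : List Char) : Int :=
  (((PySem.Set.ofList cs).countP
      (fun x => decide ((cs.count x : Int) ≤ 2 * k) && !(x == '.')) : Nat) : Int)

lemma pvGoB_eq_specCount (k : Int) (cs : List Char) : pvGoB k cs = pvSpecCount k cs := by
  induction cs using pvGoB.induct with
  | case1 => simp [pvGoB, pvSpecCount, PySem.Set.ofList]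
  | case2 c tl rest ih =>
    have hrest : rest = tl.filter (fun x => !(x == c)) := by
      simp [rest]
    -- membership facts
    have hmemrest : ∀ x, x ∈ rest ↔ (x ∈ tl ∧ x ≠ c) := by
      intro x; simp [hrest]
    have hcnotin : c ∉ PySem.Set.ofList rest := by
      simp [PySem.Set.mem_ofList, hmemrest]
    -- Set.ofList (c :: tl) is a permutation of c :: Set.ofList rest
    have hperm : (PySem.Set.ofList (c :: tl)).Perm (c :: PySem.Set.ofList rest) := by
      rw [List.perm_ext_iff_of_nodup (PySem.Set.nodup_ofList _)
        (List.nodup_cons.mpr ⟨hcnotin, PySem.Set.nodup_ofList _⟩)]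
      intro x
      by_cases hxc : x = c
      · simp [hxc, PySem.Set.mem_ofList]
      · simp [PySem.Set.mem_ofList, hmemrest, hxc]
    -- frequency of c read off the length drop
    have hcount : ((c :: tl).length : Int) - (rest.length : Int) = ((c :: tl).count c : Int) := by
      have h1 : rest.length = tl.countP (fun x => !(x == c)) := by
        rw [hrest, ← List.countP_eq_length_filter]
      have h2 : tl.countP (fun x => !(x == c)) + tl.countP (fun x => (x == c)) = tl.length :=
        pvCountP_not_add (fun x => (x == c)) tl
      have h3 : (c :: tl).count c = tl.countP (fun x => (x == c)) + 1 := by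
        simp [List.count]
      have h4 := List.countP_le_length (l := tl) (p := fun x => !(x == c))
      simp only [List.length_cons]
      omega
    -- counts of surviving characters are unchanged by removing c
    have hsame : ∀ x ∈ PySem.Set.ofList rest,
        ((decide ((rest.count x : Int) ≤ 2 * k) && !(x == '.')) = true
          ↔ (decide (((c :: tl).count x : Int) ≤ 2 * k) && !(x == '.')) = true) := by
      intro x hx
      rw [PySem.Set.mem_ofList] at hx
      have hxc : x ≠ c := ((hmemrest x).mp hx).2
      have hc : rest.count x = (c :: tl).count x := by
        rw [hrest, List.count_filter (by simp [hxc])]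
        simp only [List.count_cons]
        have : ¬ (c = x) := fun hh => hxc hh.symm
        simp [this]
      rw [hc]
    unfold pvSpecCount
    rw [pvGoB, ih, hperm.countP_eq, List.countP_cons, pvSpecCount,
      List.countP_congr hsame]
    have hdot : (decide (((c :: tl).count c : Int) ≤ 2 * k) && !(c == '.'))
        = decide (c ≠ '.' ∧ ((c :: tl).length : Int) - (rest.length : Int) ≤ 2 * k) := by
      rw [hcount]
      by_cases h1 : c = '.' <;> by_cases h2 : ((c :: tl).count c : Int) ≤ 2 * k <;>
        simp [h1]
    rw [hdot]
    by_cases h : c ≠ '.' ∧ ((c :: tl).length : Int) - (rest.length : Int) ≤ 2 * k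
    · rw [if_pos h, if_pos (decide_eq_true h)]
      push_cast
      ring
    · rw [if_neg h, if_neg (by simp only [decide_eq_true_eq]; exact h)]
      push_cast
      ring

lemma pvA_eq_specCount (k : Int) (cs : List Char) :
    (((PySem.Dict.counter cs).erase '.').values.foldl
      (fun result item => if item ≤ 2 * k then result + 1 else result) 0) = pvSpecCount k cs := by
  simp only [PySem.Dict.erase, PySem.Dict.values, PySem.Dict.items_counter,
    List.filter_map, Function.comp_def, List.map_map, List.foldl_map]
  have h := PySem.List.foldl_count_if
    (p := fun y => decide ((cs.count y : Int) ≤ 2 * k))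
    (l := (PySem.Set.ofList cs).filter (fun x => !x == '.'))
    (a := 0)
  simp only [decide_eq_true_eq] at h
  rw [h, List.countP_filter, zero_add, pvSpecCount]

-- ===== VERDICT (by name: the statement is the Claim_ definition above) =====
theorem get_simulator_printings_spec : Claim_equal_get_simulator_printings := by
  intro number_keys field _
  unfold Spec_get_simulator_printings get_simulator_printings get_simulator_printings_alt
  rw [pvA_eq_specCount, pvGoB_eq_specCount]
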